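-- pv_equiv track=rewrite | github.com/dylan90401/ai_beast | modules/agent/__init__.py | _tools_from_touched
-- ===== SOURCE A (Python) =====
-- def _tools_from_touched(touched: list[str]) -> list[str]:
--     tools = set()
--     for item in touched:
--         if item.startswith("$ "):
--             tools.add("shell")
--         elif item == "(patch)":
--             tools.add("patch")
--         elif item.startswith("GET "):
--             tools.add("http_get")
--     return sorted(tools)
-- ===== SOURCE B (Python) =====
-- def _tools_from_touched(touched: list[str]) -> list[str]:
--     out = []
--     if any(item.startswith("GET ") for item in touched):
--         out.append("http_get")
--     if any(item == "(patch)" for item in touched):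
--         out.append("patch")
--     if any(item.startswith("$ ") for item in touched):
--         out.append("shell")
--     return out
-- ===== Notes on version B (the rewrite author's own statement) =====
-- stated objective: simpler
-- what changed: Replaces the classify-into-a-set-then-sort pass with three independent any() scans that append the tool names directly in their fixed sorted order, so no set and no sort are needed.
import Mathlib
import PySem

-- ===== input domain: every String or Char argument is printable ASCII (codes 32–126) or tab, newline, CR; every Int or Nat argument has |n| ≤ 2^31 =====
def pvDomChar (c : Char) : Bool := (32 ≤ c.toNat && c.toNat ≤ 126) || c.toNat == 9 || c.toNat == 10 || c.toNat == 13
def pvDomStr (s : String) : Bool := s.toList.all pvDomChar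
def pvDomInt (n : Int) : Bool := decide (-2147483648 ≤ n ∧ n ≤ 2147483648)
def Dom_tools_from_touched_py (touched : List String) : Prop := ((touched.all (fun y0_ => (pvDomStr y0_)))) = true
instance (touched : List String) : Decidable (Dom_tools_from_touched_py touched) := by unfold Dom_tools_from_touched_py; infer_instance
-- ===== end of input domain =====

-- B replaces A's classify-into-a-set-then-sort pass with three any-scans appending the
-- tool names in their fixed sorted order (no set, no sort); same result on all inputs.

-- ===== PORT A =====
-- one step of A's loop body (the if/elif chain, in A's branch order)
def pvStepA (s : PySem.Set String) (item : String) : PySem.Set String :=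
  if PySem.Str.startswith item "$ " then PySem.Set.add s "shell"
  else if item == "(patch)" then PySem.Set.add s "patch"
  else if PySem.Str.startswith item "GET " then PySem.Set.add s "http_get"
  else s

def tools_from_touched_py (touched : List String) : List String :=
  let tools : PySem.Set String := touched.foldl pvStepA PySem.Set.empty
  PySem.List.sorted tools (fun x => x) false

-- ===== PORT B =====
def tools_from_touched_py_alt (touched : List String) : List String :=
  (if touched.any (fun item => PySem.Str.startswith item "GET ") then ["http_get"] else []) ++
  (if touched.any (fun item => item == "(patch)") then ["patch"] else []) ++
  (if touched.any (fun item => PySem.Str.startswith item "$ ") then ["shell"] else [])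

-- ===== PRECONDITION & SPEC =====
def Spec_tools_from_touched_py (touched : List String) (out : List String) : Prop := out = tools_from_touched_py_alt touched
instance (touched : List String) (out : List String) : Decidable (Spec_tools_from_touched_py touched out) := by unfold Spec_tools_from_touched_py; infer_instance

-- ===== CLAIM (what is proved, stated in full; the proofs are below) =====
def Claim_equal_tools_from_touched_py : Prop := ∀ (touched : List String), Dom_tools_from_touched_py touched → Spec_tools_from_touched_py touched (tools_from_touched_py touched)

-- ===== LEMMAS AND PROOFS =====


-- head character of a string with a non-empty literal prefix
lemma pv_head_of_sw (i : String) (c : Char) (p : List Char)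
    (h : PySem.Chars.startswith i.toList (c :: p) = true) : ∃ t, i.toList = c :: t := by
  rcases (PySem.Chars.startswith_iff _ _).1 h with ⟨t, ht⟩
  exact ⟨p ++ t, by simpa using ht.symm⟩

-- the three branch tests of A's loop are mutually exclusive
lemma pv_dollar_excl (i : String) (h : PySem.Str.startswith i "$ " = true) :
    i ≠ "(patch)" ∧ PySem.Str.startswith i "GET " = false := by
  rw [PySem.Str.startswith_eq] at h
  obtain ⟨t, ht⟩ := pv_head_of_sw i '$' [' '] h
  constructor
  · intro hi; rw [hi] at ht; simp at ht
  · rw [PySem.Str.startswith_eq]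
    by_contra hv
    obtain ⟨t2, ht2⟩ := pv_head_of_sw i 'G' ['E','T',' '] (by simpa using hv)
    rw [ht] at ht2; simp at ht2

-- membership in A's loop state
lemma pv_mem_fold (touched : List String) (s : PySem.Set String) (x : String) :
    x ∈ touched.foldl pvStepA s ↔ x ∈ s
      ∨ (x = "shell" ∧ touched.any (fun item => PySem.Str.startswith item "$ ") = true)
      ∨ (x = "patch" ∧ touched.any (fun item => item == "(patch)") = true)
      ∨ (x = "http_get" ∧ touched.any (fun item => PySem.Str.startswith item "GET ") = true) := by
  induction touched generalizing s with
  | nil => simp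
  | cons i t ih =>
    simp only [List.foldl_cons, List.any_cons]
    by_cases h1 : PySem.Str.startswith i "$ " = true
    · obtain ⟨hne, hg⟩ := pv_dollar_excl i h1
      have h1' : PySem.Chars.startswith i.toList ['$', ' '] = true := by
        simpa [PySem.Str.startswith_eq] using h1
      have hg' : PySem.Chars.startswith i.toList ['G', 'E', 'T', ' '] = false := by
        simpa [PySem.Str.startswith_eq] using hg
      rw [show pvStepA s i = PySem.Set.add s "shell" from by simp [pvStepA, h1'], ih]
      simp [PySem.Set.mem_add, h1', hg', hne]
      aesop
    · by_cases h2 : i = "(patch)"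
      · subst h2
        have hd' : PySem.Chars.startswith ['(', 'p', 'a', 't', 'c', 'h', ')'] ['$', ' '] = false := by decide
        have hg' : PySem.Chars.startswith ['(', 'p', 'a', 't', 'c', 'h', ')'] ['G', 'E', 'T', ' '] = false := by decide
        rw [show pvStepA s "(patch)" = PySem.Set.add s "patch" from by
          simp only [pvStepA, PySem.Str.startswith_eq]
          simp [hd'], ih]
        simp [PySem.Set.mem_add, hd', hg']
        aesop
      · by_cases h3 : PySem.Str.startswith i "GET " = true
        · have h3' : PySem.Chars.startswith i.toList ['G', 'E', 'T', ' '] = true := by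
            simpa [PySem.Str.startswith_eq] using h3
          have h1' : PySem.Chars.startswith i.toList ['$', ' '] = false := by
            simpa [PySem.Str.startswith_eq] using h1
          rw [show pvStepA s i = PySem.Set.add s "http_get" from by
            simp [pvStepA, h1', h2, h3'], ih]
          simp [PySem.Set.mem_add, h1', h2, h3']
          aesop
        · have h1' : PySem.Chars.startswith i.toList ['$', ' '] = false := by
            simpa [PySem.Str.startswith_eq] using h1
          have h3' : PySem.Chars.startswith i.toList ['G', 'E', 'T', ' '] = false := by
            simpa [PySem.Str.startswith_eq] using h3
          rw [show pvStepA s i = s from by simp [pvStepA, h1', h2, h3'], ih]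
          simp [h1', h2, h3']

lemma pv_nodup_fold (touched : List String) (s : PySem.Set String) (hs : s.Nodup) :
    (touched.foldl pvStepA s).Nodup := by
  induction touched generalizing s with
  | nil => exact hs
  | cons i t ih =>
    simp only [List.foldl_cons]
    apply ih
    unfold pvStepA
    split_ifs <;> first | exact PySem.Set.nodup_add _ _ hs | exact hs


-- ===== VERDICT (by name: the statement is the Claim_ definition above) =====
theorem tools_from_touched_py_spec : Claim_equal_tools_from_touched_py := by
  intro touched _
  unfold Spec_tools_from_touched_py tools_from_touched_py tools_from_touched_py_alt
  apply PySem.List.sorted_eq_of_perm_of_pairwise_lt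
  · apply (List.perm_ext_iff_of_nodup ?_ (pv_nodup_fold touched _ List.nodup_nil)).2
    · intro x
      rw [pv_mem_fold touched ([] : PySem.Set String) x]
      cases hg : touched.any (fun item => PySem.Str.startswith item "GET ") <;>
      cases hp : touched.any (fun item => item == "(patch)") <;>
      cases hs : touched.any (fun item => PySem.Str.startswith item "$ ") <;>
        simp <;> aesop
    · cases hg : touched.any (fun item => PySem.Str.startswith item "GET ") <;>
      cases hp : touched.any (fun item => item == "(patch)") <;>
      cases hs : touched.any (fun item => PySem.Str.startswith item "$ ") <;>
        decide
  · cases hg : touched.any (fun item => PySem.Str.startswith item "GET ") <;>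
    cases hp : touched.any (fun item => item == "(patch)") <;>
    cases hs : touched.any (fun item => PySem.Str.startswith item "$ ") <;>
      simp <;> decide
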